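-- pv_equiv track=rewrite | github.com/fengkai29/JZoffer | 调整数组顺序使奇数位于偶数前面.py | reOrderArray
-- ===== SOURCE A (Python) =====
-- def reOrderArray(array):
--     # write code here
--     i = 0
--     m = 0
--     while m < len(array):
--         if array[i] % 2 == 0:
--             array.append(array[i])
--             del array[i]
--         else:
--             i = i + 1
--         m = m + 1
--     return array
-- ===== SOURCE B (Python) =====
-- def reOrderArray(array):
--     # One pass: partition into odds and evens, keep relative order, concatenate.
--     odds = [x for x in array if x % 2 != 0]
--     evens = [x for x in array if x % 2 == 0]
--     array[:] = odds + evens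
--     return array
-- ===== Notes on version B (the rewrite author's own statement) =====
-- stated objective: faster
-- what changed: replaced the quadratic while-loop that deletes each even element from the middle and re-appends it at the end with a single-pass stable partition (filter odds, filter evens, concatenate)
import Mathlib
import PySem

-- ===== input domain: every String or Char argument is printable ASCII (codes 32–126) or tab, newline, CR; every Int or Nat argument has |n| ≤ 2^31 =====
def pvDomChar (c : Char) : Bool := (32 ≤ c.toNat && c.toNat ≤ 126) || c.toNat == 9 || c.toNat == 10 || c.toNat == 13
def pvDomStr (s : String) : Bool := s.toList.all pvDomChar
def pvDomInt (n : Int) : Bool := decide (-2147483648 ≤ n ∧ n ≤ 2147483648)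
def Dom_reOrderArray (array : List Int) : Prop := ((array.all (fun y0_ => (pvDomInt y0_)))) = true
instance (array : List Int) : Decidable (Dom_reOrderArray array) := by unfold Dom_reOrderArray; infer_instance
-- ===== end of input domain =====

-- ===== PORT A =====
-- A's while-loop: m counts iterations (len(array) is constant); array[i] even → append it
-- and delete it at i; odd → advance i.  Ported as fuel recursion on the iteration count.
-- Note: the Python A mutates its argument in place; the equivalence proved here is about
-- the RETURN value (B performs the same in-place mutation via array[:] = ...).
def reOrderArrayLoop (arr : List Int) (i : Nat) (fuel : Nat) : List Int :=
  match fuel with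
  | 0 => arr
  | fuel + 1 =>
    match PySem.List.pyGet? arr (i : Int) with
    | none => arr   -- IndexError; unreachable while m < len(array)
    | some x =>
      if PySem.Int.mod x 2 == 0 then
        reOrderArrayLoop ((arr ++ [x]).eraseIdx i) i fuel
      else
        reOrderArrayLoop arr (i + 1) fuel

def reOrderArray (array : List Int) : List Int :=
  reOrderArrayLoop array 0 array.length

-- ===== PORT B =====
def reOrderArray_alt (array : List Int) : List Int :=
  (array.filter (fun x => !(PySem.Int.mod x 2 == 0))) ++
  (array.filter (fun x => PySem.Int.mod x 2 == 0))

-- ===== PRECONDITION & SPEC =====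
def Spec_reOrderArray (array : List Int) (out : List Int) : Prop := out = reOrderArray_alt array
instance (array : List Int) (out : List Int) : Decidable (Spec_reOrderArray array out) := by unfold Spec_reOrderArray; infer_instance

-- ===== CLAIM (what is proved, stated in full; the proofs are below) =====
def Claim_equal_reOrderArray : Prop := ∀ (array : List Int), Dom_reOrderArray array → Spec_reOrderArray array (reOrderArray array)

-- ===== LEMMAS AND PROOFS =====
theorem eraseIdx_append_cons (pre : List Int) (x : Int) (l : List Int) :
    (pre ++ x :: l).eraseIdx pre.length = pre ++ l := by
  induction pre with
  | nil => simp
  | cons a pre ih => simp [ih]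

-- Loop invariant: arr = pre ++ rest ++ tail with pre all odd, tail all even,
-- i = |pre|, fuel = |rest|; the loop stably partitions rest after pre / before+tail.
theorem reOrderArrayLoop_invariant (rest : List Int) :
    ∀ (pre tail : List Int),
      (∀ x ∈ pre, ¬ (PySem.Int.mod x 2 == 0) = true) →
      (∀ x ∈ tail, (PySem.Int.mod x 2 == 0) = true) →
      reOrderArrayLoop (pre ++ rest ++ tail) pre.length rest.length =
        pre ++ rest.filter (fun x => !(PySem.Int.mod x 2 == 0)) ++ tail ++
          rest.filter (fun x => PySem.Int.mod x 2 == 0) := by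
  induction rest with
  | nil => intro pre tail hpre htail; simp [reOrderArrayLoop]
  | cons x rest ih =>
    intro pre tail hpre htail
    have hget : PySem.List.pyGet? (pre ++ (x :: rest) ++ tail) (pre.length : Int) = some x := by
      rw [List.append_assoc]
      exact PySem.List.pyGet?_append_length pre (rest ++ tail) x
    by_cases hx : (PySem.Int.mod x 2 == 0) = true
    · have : (pre ++ (x :: rest) ++ tail ++ [x]).eraseIdx pre.length
          = pre ++ rest ++ (tail ++ [x]) := by
        have h2 := eraseIdx_append_cons pre x (rest ++ tail ++ [x])
        simp only [List.append_assoc] at h2 ⊢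
        exact h2
      simp only [List.length_cons, reOrderArrayLoop, hget, hx, if_pos]
      rw [this]
      have := ih pre (tail ++ [x]) hpre (by
        intro y hy
        rcases List.mem_append.mp hy with h | h
        · exact htail y h
        · simp at h; subst h; exact hx)
      rw [this]
      have hx2 : (x % 2 == 0) = true := by
        rw [← PySem.Int.mod_eq_emod_of_pos (by norm_num : (0:Int) < 2)]; exact hx
      simp [List.filter, hx2]
    · have harr : pre ++ (x :: rest) ++ tail = (pre ++ [x]) ++ rest ++ tail := by simp
      have hlen : pre.length + 1 = (pre ++ [x]).length := by simp
      simp only [List.length_cons, reOrderArrayLoop, hget, hx, Bool.false_eq_true, if_false]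
      rw [harr, hlen, ih (pre ++ [x]) tail (by
        intro y hy
        rcases List.mem_append.mp hy with h | h
        · exact hpre y h
        · simp at h; subst h; simpa using hx) htail]
      have hx2 : (x % 2 == 0) = false := by
        rw [← PySem.Int.mod_eq_emod_of_pos (by norm_num : (0:Int) < 2)]
        exact Bool.not_eq_true _ ▸ (by simpa using hx)
      simp [List.filter, hx2]

-- ===== VERDICT (by name: the statement is the Claim_ definition above) =====
theorem reOrderArray_spec : Claim_equal_reOrderArray := by
  intro array _
  unfold Spec_reOrderArray reOrderArray reOrderArray_alt
  have := reOrderArrayLoop_invariant array [] [] (by simp) (by simp)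
  simpa using this
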